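-- pv_equiv track=rewrite | github.com/easyhooon/PS_solution | 백준/Gold/1528. 금민수의 합/금민수의 합.py | bfs
-- ===== SOURCE A (Python) =====
-- from collections import deque
--
-- def bfs(n, gms):
--     queue = deque([(n, [])])
--     visited = set()
--     visited.add(n)
--
--     while queue:
--         current, path = queue.popleft()
--
--         if current == 0:
--             return sorted(path)
--
--         for g in gms:
--             next_val = current - g
--             if next_val >= 0 and next_val not in visited:
--                 visited.add(next_val)
--                 queue.append((next_val, path + [g]))
--
--     return None
-- ===== SOURCE B (Python) =====
-- from collections import deque
--
-- def bfs(n, gms):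
--     # BFS storing only states; parent pointers reconstruct the path once at the end.
--     parent = {}
--     visited = {n}
--     queue = deque([n])
--     while queue:
--         cur = queue.popleft()
--         if cur == 0:
--             path = []
--             while cur != n:
--                 g, cur = parent[cur]
--                 path.insert(0, g)
--             return sorted(path)
--         for g in gms:
--             nxt = cur - g
--             if nxt >= 0 and nxt not in visited:
--                 visited.add(nxt)
--                 parent[nxt] = (g, cur)
--                 queue.append(nxt)
--     return None
-- ===== Notes on version B (the rewrite author's own statement) =====
-- stated objective: alternative
-- what changed: A carries a full copied path (path + [g]) with every queued state; B queues bare states with a parent/coin dictionary and reconstructs the single answer path once at the end.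
-- outside the precondition, e.g. on bfs(5, [-1, 6]): A returns [-1, 6], B returns [-1, 6]
import Mathlib
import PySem

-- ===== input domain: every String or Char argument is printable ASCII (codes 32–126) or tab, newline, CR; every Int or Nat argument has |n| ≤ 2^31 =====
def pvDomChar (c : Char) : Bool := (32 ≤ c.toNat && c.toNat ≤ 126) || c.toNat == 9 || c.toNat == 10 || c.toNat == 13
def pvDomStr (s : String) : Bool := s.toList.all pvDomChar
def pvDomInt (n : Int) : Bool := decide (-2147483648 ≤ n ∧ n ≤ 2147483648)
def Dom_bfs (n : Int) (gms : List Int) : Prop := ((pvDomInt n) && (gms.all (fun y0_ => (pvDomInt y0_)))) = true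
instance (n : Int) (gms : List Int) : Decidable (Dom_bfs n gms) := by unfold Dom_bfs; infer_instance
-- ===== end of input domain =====

-- B replaces A's per-state path copies by parent pointers with one final reconstruction (an alternative algorithm, same BFS order).

-- ===== PORT A =====
-- body of A's inner `for g in gms` loop: accumulator = (queue-tail, visited)
def stepA (current : Int) (path : List Int)
    (acc : List (Int × List Int) × PySem.Set Int) (g : Int) :
    List (Int × List Int) × PySem.Set Int :=
  -- next_val := current - g, written inline
  if 0 ≤ current - g ∧ (current - g) ∉ acc.2 then
    (acc.1 ++ [(current - g, path ++ [g])], PySem.Set.add acc.2 (current - g))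
  else acc

-- A's `while queue:` loop; the fuel n.toNat+2 bounds the number of pops (each pop after
-- the first is a distinct state in [0, n), so at most n+2 iterations ever happen on Pre_).
def bfsLoopA (gms : List Int) : Nat → List (Int × List Int) → PySem.Set Int → Option (List Int)
  | 0, _, _ => none
  | _ + 1, [], _ => none
  | fuel + 1, (current, path) :: rest, visited =>
    if current = 0 then some (PySem.List.sorted path (fun x => x) false)
    else
      let st := gms.foldl (stepA current path) (rest, visited)
      bfsLoopA gms fuel st.1 st.2

def bfs (n : Int) (gms : List Int) : Option (List Int) :=
  bfsLoopA gms (n.toNat + 2) [(n, [])] (PySem.Set.add PySem.Set.empty n)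

-- ===== PORT B =====
-- body of B's inner `for g in gms` loop: accumulator = (queue-tail, parent, visited)
def stepB (cur : Int)
    (acc : List Int × PySem.Dict Int (Int × Int) × PySem.Set Int) (g : Int) :
    List Int × PySem.Dict Int (Int × Int) × PySem.Set Int :=
  -- nxt := cur - g, written inline
  if 0 ≤ cur - g ∧ (cur - g) ∉ acc.2.2 then
    (acc.1 ++ [cur - g], (acc.2.1).insert (cur - g) (g, cur), PySem.Set.add acc.2.2 (cur - g))
  else acc

-- B's reconstruction loop `while cur != n: g, cur = parent[cur]; path.insert(0, g)`;
-- fuel n.toNat+1 bounds the path length; `none` = the (unreachable) KeyError.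
def reconB (parent : PySem.Dict Int (Int × Int)) (n : Int) : Nat → Int → List Int → Option (List Int)
  | 0, cur, path => if cur = n then some path else none
  | f + 1, cur, path =>
    if cur = n then some path
    else
      match parent.get? cur with
      | none => none
      | some gp => reconB parent n f gp.2 (gp.1 :: path)

-- B's `while queue:` loop, same fuel bound as A's.
def bfsLoopB (gms : List Int) (n : Int) :
    Nat → List Int → PySem.Dict Int (Int × Int) → PySem.Set Int → Option (List Int)
  | 0, _, _, _ => none
  | _ + 1, [], _, _ => none
  | fuel + 1, cur :: rest, parent, visited =>
    if cur = 0 then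
      (reconB parent n (n.toNat + 1) cur []).map
        (fun path => PySem.List.sorted path (fun x => x) false)
    else
      let st := gms.foldl (stepB cur) (rest, parent, visited)
      bfsLoopB gms n fuel st.1 st.2.1 st.2.2

def bfs_alt (n : Int) (gms : List Int) : Option (List Int) :=
  bfsLoopB gms n (n.toNat + 2) [n] PySem.Dict.empty (PySem.Set.add PySem.Set.empty n)

-- ===== PRECONDITION & SPEC =====
-- Pre_ excludes a negative coin anywhere in gms: with a negative coin A's BFS can generate
-- ever-growing states and loop forever (e.g. bfs(1, [-1]) never returns); on the terminating
-- part of that region the fueled ports are not faithful to the unbounded Python loops,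
-- so the whole negative-coin region is excluded.
def Pre_bfs (n : Int) (gms : List Int) : Prop := ∀ g ∈ gms, 0 ≤ g
instance (n : Int) (gms : List Int) : Decidable (Pre_bfs n gms) := by unfold Pre_bfs; infer_instance

def pvWitness_bfs : Int × List Int := (11, [4, 7])

def Spec_bfs (n : Int) (gms : List Int) (out : Option (List Int)) : Prop := out = bfs_alt n gms
instance (n : Int) (gms : List Int) (out : Option (List Int)) : Decidable (Spec_bfs n gms out) := by unfold Spec_bfs; infer_instance

-- ===== CLAIM (what is proved, stated in full; the proofs are below) =====
def Claim_equal_bfs : Prop := ∀ (n : Int) (gms : List Int), Dom_bfs n gms → Pre_bfs n gms → Spec_bfs n gms (bfs n gms)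

-- ===== LEMMAS AND PROOFS =====

-- What BFS guarantees for every queued pair (s, p): s is visited, the parent chain from s
-- reconstructs exactly p, and p is short enough for the reconstruction fuel.
def GoodPair (n : Int) (parent : PySem.Dict Int (Int × Int)) (visited : PySem.Set Int)
    (q : Int × List Int) : Prop :=
  q.1 ∈ visited ∧
  (∀ (f : Nat) (acc : List Int), q.2.length ≤ f → reconB parent n f q.1 acc = some (q.2 ++ acc)) ∧
  ((0 ≤ q.1 ∧ (q.2.length : Int) + q.1 ≤ n) ∨ (q.1 = n ∧ q.2 = []))

-- inserting a fresh key does not change a successful reconstruction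
lemma reconB_insert (parent : PySem.Dict Int (Int × Int)) (n k : Int) (v : Int × Int)
    (hk : parent.get? k = none) :
    ∀ (f : Nat) (cur : Int) (acc r : List Int),
      reconB parent n f cur acc = some r → reconB (parent.insert k v) n f cur acc = some r := by
  intro f
  induction f with
  | zero => intro cur acc r h; simpa [reconB] using h
  | succ f ih =>
    intro cur acc r h
    by_cases hcur : cur = n
    · simpa [reconB, hcur] using h
    · simp only [reconB, if_neg hcur] at h ⊢
      cases hget : parent.get? cur with
      | none => rw [hget] at h; exact absurd h (by simp)
      | some gp =>
        rw [hget] at h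
        have hne : cur ≠ k := by intro he; rw [he, hk] at hget; exact absurd hget (by simp)
        rw [PySem.Dict.get?_insert_of_ne _ _ hne, hget]
        exact ih _ _ _ h

-- the inner for-loops of A and B stay in lockstep and preserve all invariants
lemma fold_inv (n c : Int) (p : List Int) (gs : List Int) (hg : ∀ g ∈ gs, 0 ≤ g) :
    ∀ (restA : List (Int × List Int)) (parent : PySem.Dict Int (Int × Int)) (visited : PySem.Set Int),
      n ∈ visited →
      (∀ k ∈ parent.keys, k ∈ visited) →
      GoodPair n parent visited (c, p) →
      (∀ q ∈ restA, GoodPair n parent visited q) →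
      (gs.foldl (stepB c) (restA.map Prod.fst, parent, visited)).1
          = (gs.foldl (stepA c p) (restA, visited)).1.map Prod.fst ∧
      (gs.foldl (stepB c) (restA.map Prod.fst, parent, visited)).2.2
          = (gs.foldl (stepA c p) (restA, visited)).2 ∧
      n ∈ (gs.foldl (stepA c p) (restA, visited)).2 ∧
      (∀ k ∈ ((gs.foldl (stepB c) (restA.map Prod.fst, parent, visited)).2.1).keys,
          k ∈ (gs.foldl (stepA c p) (restA, visited)).2) ∧
      GoodPair n (gs.foldl (stepB c) (restA.map Prod.fst, parent, visited)).2.1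
          (gs.foldl (stepA c p) (restA, visited)).2 (c, p) ∧
      (∀ q ∈ (gs.foldl (stepA c p) (restA, visited)).1,
          GoodPair n (gs.foldl (stepB c) (restA.map Prod.fst, parent, visited)).2.1
            (gs.foldl (stepA c p) (restA, visited)).2 q) := by
  induction gs with
  | nil =>
    intro restA parent visited hn hkeys hc hrest
    exact ⟨rfl, rfl, hn, hkeys, hc, hrest⟩
  | cons g gs ih =>
    intro restA parent visited hn hkeys hc hrest
    obtain ⟨hcv, hcrec, hcb⟩ := hc
    dsimp only at hcv hcrec hcb
    have hg0 : 0 ≤ g := hg g (List.mem_cons_self ..)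
    have hg' : ∀ x ∈ gs, 0 ≤ x := fun x hx => hg x (List.mem_cons_of_mem _ hx)
    simp only [List.foldl_cons]
    by_cases hcond : 0 ≤ c - g ∧ (c - g) ∉ visited
    · -- the push branch: same new state on both sides
      have hAstep : stepA c p (restA, visited) g
          = (restA ++ [(c - g, p ++ [g])], PySem.Set.add visited (c - g)) := by
        unfold stepA; split_ifs with h
        · rfl
        · exact absurd hcond h
      have hBstep : stepB c (restA.map Prod.fst, parent, visited) g
          = (restA.map Prod.fst ++ [c - g], parent.insert (c - g) (g, c),
             PySem.Set.add visited (c - g)) := by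
        unfold stepB; split_ifs with h
        · rfl
        · exact absurd hcond h
      rw [hAstep, hBstep]
      have hfresh : parent.get? (c - g) = none := by
        rw [PySem.Dict.get?_eq_none_iff_not_mem_keys]
        intro hmem; exact hcond.2 (hkeys _ hmem)
      have hgo : GoodPair n (parent.insert (c - g) (g, c)) (PySem.Set.add visited (c - g)) (c, p) := by
        refine ⟨(PySem.Set.mem_add _ _ _).2 (Or.inl hcv), fun f acc hf => ?_, hcb⟩
        exact reconB_insert parent n (c - g) (g, c) hfresh f c acc _ (hcrec f acc hf)
      have hgne : g ≠ 0 := by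
        intro he; apply hcond.2; rw [he, sub_zero]; exact hcv
      have hg1 : 1 ≤ g := by omega
      have hnewpair : GoodPair n (parent.insert (c - g) (g, c)) (PySem.Set.add visited (c - g))
          (c - g, p ++ [g]) := by
        refine ⟨(PySem.Set.mem_add _ _ _).2 (Or.inr rfl), ?_, ?_⟩
        · intro f acc hf
          have hne_n : c - g ≠ n := fun he => hcond.2 (he ▸ hn)
          obtain ⟨f', rfl⟩ : ∃ f', f = f' + 1 := by
            cases f with
            | zero => simp at hf
            | succ f' => exact ⟨f', rfl⟩
          have hrec : reconB (parent.insert (c - g) (g, c)) n f' c (g :: acc) = some (p ++ g :: acc) := by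
            apply reconB_insert parent n (c - g) (g, c) hfresh
            apply hcrec
            simp at hf; omega
          simp only [reconB, if_neg hne_n, PySem.Dict.get?_insert_self]
          rw [hrec]
          simp
        · left
          refine ⟨hcond.1, ?_⟩
          have hlen : (((p ++ [g]).length : Int)) = (p.length : Int) + 1 := by simp
          dsimp only
          rw [hlen]
          rcases hcb with ⟨h0, hle⟩ | ⟨hcn, hpnil⟩
          · omega
          · subst hcn; subst hpnil; simp; omega
      have := ih hg' (restA ++ [(c - g, p ++ [g])]) (parent.insert (c - g) (g, c))
          (PySem.Set.add visited (c - g)) ((PySem.Set.mem_add _ _ _).2 (Or.inl hn))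
          (by
            intro k hk
            rcases (PySem.Dict.mem_keys_insert _ _ _ _).1 hk with h | h
            · exact (PySem.Set.mem_add _ _ _).2 (Or.inr h)
            · exact (PySem.Set.mem_add _ _ _).2 (Or.inl (hkeys _ h)))
          hgo
          (by
            intro q hq
            rcases List.mem_append.1 hq with h | h
            · have hq' := hrest q h
              refine ⟨(PySem.Set.mem_add _ _ _).2 (Or.inl hq'.1), fun f acc hf => ?_, hq'.2.2⟩
              exact reconB_insert parent n (c - g) (g, c) hfresh f q.1 acc _ (hq'.2.1 f acc hf)
            · simp at h; rw [h]; exact hnewpair)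
      simpa [List.map_append] using this
    · -- the skip branch: both accumulators unchanged
      have hAstep : stepA c p (restA, visited) g = (restA, visited) := by
        unfold stepA; split_ifs with h
        · exact absurd h hcond
        · rfl
      have hBstep : stepB c (restA.map Prod.fst, parent, visited) g
          = (restA.map Prod.fst, parent, visited) := by
        unfold stepB; split_ifs with h
        · exact absurd h hcond
        · rfl
      rw [hAstep, hBstep]
      exact ih hg' restA parent visited hn hkeys ⟨hcv, hcrec, hcb⟩ hrest

-- the two while-loops agree step for step
lemma lockstep (n : Int) (gms : List Int) (hg : ∀ g ∈ gms, 0 ≤ g) :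
    ∀ (fuel : Nat) (qA : List (Int × List Int)) (parent : PySem.Dict Int (Int × Int))
      (visited : PySem.Set Int),
      n ∈ visited →
      (∀ k ∈ parent.keys, k ∈ visited) →
      (∀ q ∈ qA, GoodPair n parent visited q) →
      bfsLoopA gms fuel qA visited = bfsLoopB gms n fuel (qA.map Prod.fst) parent visited := by
  intro fuel
  induction fuel with
  | zero => intro qA parent visited _ _ _; simp [bfsLoopA, bfsLoopB]
  | succ fuel ih =>
    intro qA parent visited hn hkeys hq
    cases qA with
    | nil => simp [bfsLoopA, bfsLoopB]
    | cons q rest =>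
      obtain ⟨c, p⟩ := q
      have hcq := hq (c, p) (List.mem_cons_self ..)
      simp only [List.map_cons, bfsLoopA, bfsLoopB]
      obtain ⟨hcv, hcrec, hcb⟩ := hcq
      dsimp only at hcv hcrec hcb
      by_cases hc : c = 0
      · subst hc
        rw [if_pos rfl, if_pos rfl]
        have hlen : p.length ≤ n.toNat + 1 := by
          rcases hcb with ⟨_, hle⟩ | ⟨_, hpnil⟩
          · omega
          · rw [hpnil]; simp
        rw [hcrec (n.toNat + 1) [] hlen]
        simp
      · rw [if_neg hc, if_neg hc]
        obtain ⟨h1, h2, h3, h4, _, h6⟩ := fold_inv n c p gms hg rest parent visited hn hkeys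
          ⟨hcv, hcrec, hcb⟩ (fun r hr => hq r (List.mem_cons_of_mem _ hr))
        rw [h1, h2]
        exact ih _ _ _ h3 (fun k hk => h4 k hk) h6

-- ===== VERDICT (by name: the statement is the Claim_ definition above) =====
theorem bfs_spec : Claim_equal_bfs := by
  intro n gms _ hpre
  unfold Spec_bfs bfs bfs_alt
  have : [n] = ([(n, ([] : List Int))].map Prod.fst) := rfl
  rw [this]
  apply lockstep n gms hpre (n.toNat + 2) [(n, [])] PySem.Dict.empty
    (PySem.Set.add PySem.Set.empty n) ?_ ?_ ?_
  · exact (PySem.Set.mem_add _ _ _).2 (Or.inr rfl)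
  · intro k hk; simp [PySem.Dict.keys_empty] at hk
  · intro q hq
    simp at hq
    rw [hq]
    refine ⟨(PySem.Set.mem_add _ _ _).2 (Or.inr rfl), fun f acc _ => ?_, Or.inr ⟨rfl, rfl⟩⟩
    cases f <;> simp [reconB]
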